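-- pv_equiv track=rewrite | github.com/madhums511/Qubit-ADAPT-VQE | adapt.py | pool1
-- ===== SOURCE A (Python) =====
-- def pool1(Nq):
--     '''
--     Params:
--         Nq : (int) Number of available qubits
--     Returns:
--         pool_list : (list(QuantumCircuit)) Global pool {V}_{Nq} list with 2*(Nq-1) elements
--     '''
--     pool_list = ['Y']
--     for i in range(1 , Nq):
--         for j in range(len(pool_list)):
--             pool_list[j]+='Z'
--         pool_list.append('Y')
--
--         if i>1:
--             pool_list.append("YI")
--
--     for i in range(len(pool_list)):
--         pool_list[i] = pool_list[i][::-1]+ ('I'*(Nq - len(pool_list[i])))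
--     return pool_list
-- ===== SOURCE B (Python) =====
-- def pool1(Nq):
--     '''
--     Params:
--         Nq : (int) Number of available qubits
--     Returns:
--         pool_list : (list(str)) Global pool {V}_{Nq} list with 2*(Nq-1) elements
--     '''
--     if Nq <= 1:
--         return ['Y']
--     pool_list = ['Z' * (Nq - 1) + 'Y']
--     for i in range(1, Nq):
--         z = 'Z' * (Nq - 1 - i)
--         pool_list.append(z + 'Y' + 'I' * i)
--         if i > 1:
--             pool_list.append(z + 'IY' + 'I' * (i - 1))
--     return pool_list
-- ===== Notes on version B (the rewrite author's own statement) =====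
-- stated objective: faster
-- what changed: Instead of growing every existing string by one 'Z' per outer iteration and then reversing+padding each string in a final pass, B emits each final padded string directly in closed form ('Z'*(Nq-1-i) + 'Y'/'IY' + 'I'*pad) in a single loop.
import Mathlib
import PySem

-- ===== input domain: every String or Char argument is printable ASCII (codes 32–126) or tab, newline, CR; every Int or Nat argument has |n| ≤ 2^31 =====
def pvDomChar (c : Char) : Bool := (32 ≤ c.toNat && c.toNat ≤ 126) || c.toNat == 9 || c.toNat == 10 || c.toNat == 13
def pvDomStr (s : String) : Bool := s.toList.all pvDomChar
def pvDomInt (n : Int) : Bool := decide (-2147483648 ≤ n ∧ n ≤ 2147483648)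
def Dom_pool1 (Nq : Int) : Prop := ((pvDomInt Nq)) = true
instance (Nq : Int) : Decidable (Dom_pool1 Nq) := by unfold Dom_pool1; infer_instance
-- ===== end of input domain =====

-- B builds each final padded/reversed Pauli string directly in closed form in one pass (O(Nq^2))
-- instead of A's repeated elongation of every string plus a final reverse/pad pass (O(Nq^3)).

-- ===== PORT A =====
-- strings are carried as List Char (PySem convention) and packed with String.ofList at the end;
-- s[::-1] is List.reverse (PySem.List.slice?_none_none_neg_one), 'I'*k is PySem.List.pyRepeat.
def pool1 (Nq : Int) : List String :=
  let pool := (PySem.List.pyRange 1 Nq 1).foldl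
    (fun pl i =>
      let pl := pl.map (fun s => s ++ ['Z'])      -- for j in range(len(pool_list)): pool_list[j] += 'Z'
      let pl := pl ++ [['Y']]                     -- pool_list.append('Y')
      if 1 < i then pl ++ [['Y','I']] else pl)    -- if i > 1: pool_list.append('YI')
    [['Y']]
  pool.map (fun s => String.ofList (s.reverse ++ PySem.List.pyRepeat ['I'] (Nq - (s.length : Int))))

-- ===== PORT B =====
def pool1_alt (Nq : Int) : List String :=
  if Nq ≤ 1 then ["Y"]
  else
    (PySem.List.pyRange 1 Nq 1).foldl
      (fun acc i =>
        let z := PySem.List.pyRepeat ['Z'] (Nq - 1 - i)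
        acc ++ (String.ofList (z ++ ['Y'] ++ PySem.List.pyRepeat ['I'] i) ::
          (if 1 < i then [String.ofList (z ++ ['I','Y'] ++ PySem.List.pyRepeat ['I'] (i - 1))] else [])))
      [String.ofList (PySem.List.pyRepeat ['Z'] (Nq - 1) ++ ['Y'])]

-- ===== PRECONDITION & SPEC =====
def Spec_pool1 (Nq : Int) (out : List String) : Prop := out = pool1_alt Nq
instance (Nq : Int) (out : List String) : Decidable (Spec_pool1 Nq out) := by unfold Spec_pool1; infer_instance

-- ===== CLAIM (what is proved, stated in full; the proofs are below) =====
def Claim_equal_pool1 : Prop := ∀ (Nq : Int), Dom_pool1 Nq → Spec_pool1 Nq (pool1 Nq)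

-- ===== LEMMAS AND PROOFS =====

-- A's pool after the outer loop has run for i = 1 .. n (closed form of the loop state).
def specPool (n : Nat) : List (List Char) :=
  ('Y' :: List.replicate n 'Z') ::
  (List.range n).flatMap (fun t =>
    ('Y' :: List.replicate (n - (t+1)) 'Z') ::
    (if 0 < t then [['Y','I'] ++ List.replicate (n - (t+1)) 'Z'] else []))

-- the common final value for Nq = n+1 (n ≥ 1), already reversed and padded
def specOut (n : Nat) : List String :=
  String.ofList (List.replicate n 'Z' ++ ['Y']) ::
  (List.range n).flatMap (fun t =>
    String.ofList (List.replicate (n-(t+1)) 'Z' ++ ['Y'] ++ List.replicate (t+1) 'I') ::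
    (if 0 < t then [String.ofList (List.replicate (n-(t+1)) 'Z' ++ ['I','Y'] ++ List.replicate t 'I')] else []))

theorem foldA_eq (n : Nat) :
    (PySem.List.pyRange 1 ((n:Int)+1) 1).foldl
      (fun pl i =>
        let pl := pl.map (fun s => s ++ ['Z'])
        let pl := pl ++ [['Y']]
        if 1 < i then pl ++ [['Y','I']] else pl)
      [['Y']] = specPool n := by
  induction n with
  | zero =>
      norm_num [specPool, PySem.List.pyRange_one_eq_nil (le_refl (1:Int))]
  | succ m ih =>
      push_cast
      rw [PySem.List.pyRange_one_succ_right (by omega : (1:Int) ≤ (m:Int)+1), List.foldl_append, ih]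
      simp only [List.foldl_cons, List.foldl_nil]
      by_cases hm : 0 < m
      · simp only [specPool, if_pos (by omega : (1:Int) < (m:Int)+1), List.range_succ,
          List.flatMap_append, List.map_cons, List.map_flatMap]
        have hfm : List.flatMap
            (fun t => ('Y' :: (List.replicate (m - (t + 1)) 'Z' ++ ['Z'])) ::
              List.map (fun s => s ++ ['Z']) (if 0 < t then [['Y','I'] ++ List.replicate (m - (t + 1)) 'Z'] else []))
            (List.range m)
            = List.flatMap
            (fun t => ('Y' :: List.replicate (m + 1 - (t + 1)) 'Z') ::
              (if 0 < t then [['Y','I'] ++ List.replicate (m + 1 - (t + 1)) 'Z'] else []))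
            (List.range m) := by
          refine List.flatMap_congr (fun t ht => ?_)
          have htm : t < m := List.mem_range.mp ht
          have hrep : List.replicate (m-(t+1)) 'Z' ++ ['Z'] = List.replicate (m+1-(t+1)) 'Z' := by
            rw [← List.replicate_succ']; congr 1; omega
          by_cases h0 : 0 < t <;> simp [h0, hrep]
        simp only [List.cons_append] at hfm ⊢
        rw [hfm]
        have hz : List.replicate m 'Z' ++ ['Z'] = List.replicate (m+1) 'Z' := (List.replicate_succ' ..).symm
        simp [hz, hm]
      · have h0 : m = 0 := by omega
        subst h0
        norm_num [specPool]

theorem mapA_eq (n : Nat) :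
    (specPool n).map (fun s => String.ofList (s.reverse ++ PySem.List.pyRepeat ['I'] (((n:Int)+1) - (s.length : Int)))) = specOut n := by
  simp only [specPool, specOut, List.map_cons, List.map_flatMap]
  congr 1
  · simp [PySem.List.pyRepeat_singleton, List.reverse_replicate]
  · refine List.flatMap_congr (fun t ht => ?_)
    have htm : t < n := List.mem_range.mp ht
    have e1 : n - (n - (t+1)) = t+1 := by omega
    have e2 : n - (n - (t+1) + 1) = t := by omega
    by_cases hp : 0 < t <;>
      simp [hp, PySem.List.pyRepeat_singleton, List.reverse_replicate, List.append_assoc, e1, e2]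
    rw [show ('I'::'Y'::List.replicate t 'I') = ['I','Y'] ++ List.replicate t 'I' from rfl,
      String.ofList_append]
    simp [String.append_assoc]

theorem altB_eq (n : Nat) (hn : 1 ≤ n) : pool1_alt ((n:Int)+1) = specOut n := by
  rw [pool1_alt, if_neg (by omega : ¬((n:Int)+1 ≤ 1))]
  simp only []
  rw [PySem.List.foldl_append_eq_flatMap, PySem.List.pyRange_one]
  rw [show ((n:Int)+1-1) = (n:Int) by ring, Int.toNat_natCast, List.flatMap_map]
  have hz : PySem.List.pyRepeat ['Z'] (n:Int) = List.replicate n 'Z' := by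
    simp [PySem.List.pyRepeat_singleton]
  rw [hz, specOut]
  rw [List.flatMap_congr (g := fun t => String.ofList (List.replicate (n-(t+1)) 'Z' ++ ['Y'] ++ List.replicate (t+1) 'I') ::
      (if 0 < t then [String.ofList (List.replicate (n-(t+1)) 'Z' ++ ['I','Y'] ++ List.replicate t 'I')] else []))
    (fun t ht => by
      have htm : t < n := List.mem_range.mp ht
      have hz1 : PySem.List.pyRepeat ['Z'] ((n:Int)-(1+(t:Int))) = List.replicate (n-(t+1)) 'Z' := by
        rw [PySem.List.pyRepeat_singleton]; congr 1; omega
      have hi1 : PySem.List.pyRepeat ['I'] (1+(t:Int)) = List.replicate (t+1) 'I' := by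
        rw [PySem.List.pyRepeat_singleton]; congr 1; omega
      have hi2 : PySem.List.pyRepeat ['I'] (1+(t:Int)-1) = List.replicate t 'I' := by
        rw [PySem.List.pyRepeat_singleton]; congr 1; omega
      simp only [hz1, hi1, hi2]
      by_cases hp : 0 < t
      · rw [if_pos (by omega : (1:Int) < 1+(t:Int)), if_pos hp]
      · rw [if_neg (by omega : ¬(1:Int) < 1+(t:Int)), if_neg hp])]
  simp

theorem small_case (Nq : Int) (h : Nq ≤ 1) : pool1 Nq = pool1_alt Nq := by
  simp [pool1, pool1_alt, PySem.List.pyRange_one_eq_nil h, PySem.List.pyRepeat_singleton, h]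

-- ===== VERDICT (by name: the statement is the Claim_ definition above) =====
theorem pool1_spec : Claim_equal_pool1 := by
  intro Nq _
  unfold Spec_pool1
  by_cases h : Nq ≤ 1
  · exact small_case Nq h
  · have hn : Nq = ((Nq - 1).toNat : Int) + 1 := by omega
    have h1 : 1 ≤ (Nq - 1).toNat := by omega
    rw [hn]
    show ((PySem.List.pyRange 1 (((Nq-1).toNat:Int)+1) 1).foldl _ [['Y']]).map _ = _
    rw [foldA_eq, mapA_eq, altB_eq _ h1]
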